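-- pv_equiv track=rewrite | github.com/vidyasagarbhargava/ai_research_program | 03_llm_step_by_step/01_stage/1_data_preparation_and_sampling/word2vec.py | get_focus_context_pairs
-- ===== SOURCE A (Python) =====
-- def get_focus_context_pairs(tokenized_corpus, window_size=2):
--     focus_context_pairs = []
--     for sentence in tokenized_corpus:
--
--         for token_idx, token in enumerate(sentence):
--             for w in range(-window_size, window_size+1):
--                 context_word_pos = token_idx + w
--
--                 if w == 0 or context_word_pos >= len(sentence) or context_word_pos < 0:
--                     continue
--
--                 try:
--                     focus_context_pairs.append([token, sentence[context_word_pos]])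
--                 except:
--                     continue
--
--     return focus_context_pairs
-- ===== SOURCE B (Python) =====
-- def get_focus_context_pairs(tokenized_corpus, window_size=2):
--     pairs = []
--     for sentence in tokenized_corpus:
--         # forward pass: a sliding buffer holds the previous (up to) window_size tokens
--         lefts = []
--         buf = []
--         for tok in sentence:
--             lefts.append([[tok, c] for c in buf])
--             buf.append(tok)
--             if len(buf) > window_size:
--                 buf.pop(0)
--         # backward pass: a sliding buffer holds the following (up to) window_size tokens
--         rights = []
--         buf = []
--         for tok in reversed(sentence):
--             rights.append([[tok, c] for c in buf])
--             buf.insert(0, tok)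
--             del buf[window_size:]
--         rights.reverse()
--         for l, r in zip(lefts, rights):
--             pairs.extend(l)
--             pairs.extend(r)
--     return pairs
-- ===== Notes on version B (the rewrite author's own statement) =====
-- stated objective: faster
-- what changed: Instead of A's per-token loop over integer offsets -window..+window with a w==0 guard and per-offset bounds checks and indexing, B makes two staged passes per sentence - a forward pass maintaining a sliding buffer of the previous window_size tokens and a backward pass over the reversed sentence maintaining a buffer of the following tokens - and zips the two per-token row lists together; per token B touches only the actual context words (at most min(window, sentence_len) each side) while A always iterates 2*window+1 offsets.
import Mathlib
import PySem

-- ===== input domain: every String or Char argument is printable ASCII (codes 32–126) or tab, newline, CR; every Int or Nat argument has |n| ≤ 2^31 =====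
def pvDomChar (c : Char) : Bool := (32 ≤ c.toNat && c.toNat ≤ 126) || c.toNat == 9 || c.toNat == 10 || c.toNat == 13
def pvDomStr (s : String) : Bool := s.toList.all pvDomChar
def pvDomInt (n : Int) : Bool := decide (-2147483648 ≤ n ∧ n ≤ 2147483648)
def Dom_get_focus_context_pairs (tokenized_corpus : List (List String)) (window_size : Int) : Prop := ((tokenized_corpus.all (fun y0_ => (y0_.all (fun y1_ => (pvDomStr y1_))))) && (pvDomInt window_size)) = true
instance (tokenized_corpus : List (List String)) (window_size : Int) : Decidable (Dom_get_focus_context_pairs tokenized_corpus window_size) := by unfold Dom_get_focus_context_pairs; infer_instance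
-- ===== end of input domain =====

-- B replaces A's per-token offset loop (bounds-checked window offsets) with two staged passes — a forward and a backward sliding context buffer — merged by zip; same pairs in the same order; objective: faster (per token B touches only the actual context words, A iterates all 2*window+1 offsets).


-- ===== PORT A =====
def get_focus_context_pairs (tokenized_corpus : List (List String)) (window_size : Int) : List (List String) :=
  tokenized_corpus.foldl (fun acc sentence =>
    (PySem.List.enumerate sentence 0).foldl (fun acc2 p =>
      (PySem.List.pyRange (-window_size) (window_size + 1) 1).foldl (fun acc3 w =>
        if w = 0 ∨ (sentence.length : Int) ≤ p.1 + w ∨ p.1 + w < 0 then acc3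
        else
          match PySem.List.pyGet? sentence (p.1 + w) with
          | some c => acc3 ++ [[p.2, c]]
          | none => acc3) acc2) acc) []

-- ===== PORT B =====
-- forward pass collects each token's row of left-context pairs while a buffer keeps the previous
-- (up to) window_size tokens; Python's buf.pop(0) is guarded by len(buf) > window_size, so the
-- buffer is never empty there and the none branch of pop? is unreachable.
-- backward pass (over reversed(sentence)) collects right-context rows with buf.insert(0, tok)
-- then del buf[window_size:] (= keep buf[:window_size]); rows are reversed back and the two row
-- lists are merged by zip, extending the result with l then r.
def get_focus_context_pairs_alt (tokenized_corpus : List (List String)) (window_size : Int) : List (List String) :=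
  tokenized_corpus.foldl (fun pairs sentence =>
    let fwd := sentence.foldl (fun (st : List (List (List String)) × List String) tok =>
      let lefts := st.1 ++ [st.2.map (fun c => [tok, c])]
      let buf := st.2 ++ [tok]
      let buf := if window_size < (PySem.List.len buf) then
          match PySem.List.pop? buf 0 with
          | some r => r.2
          | none => buf
        else buf
      (lefts, buf)) ([], [])
    let bwd := sentence.reverse.foldl (fun (st : List (List (List String)) × List String) tok =>
      let rights := st.1 ++ [st.2.map (fun c => [tok, c])]
      let buf := PySem.List.slice (PySem.List.insert st.2 0 tok) none (some window_size)
      (rights, buf)) ([], [])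
    (fwd.1.zip bwd.1.reverse).foldl (fun acc lr => acc ++ lr.1 ++ lr.2) pairs) []

-- ===== PRECONDITION & SPEC =====
def Spec_get_focus_context_pairs (tokenized_corpus : List (List String)) (window_size : Int) (out : List (List String)) : Prop := out = get_focus_context_pairs_alt tokenized_corpus window_size
instance (tokenized_corpus : List (List String)) (window_size : Int) (out : List (List String)) : Decidable (Spec_get_focus_context_pairs tokenized_corpus window_size out) := by unfold Spec_get_focus_context_pairs; infer_instance

-- ===== CLAIM (what is proved, stated in full; the proofs are below) =====
def Claim_equal_get_focus_context_pairs : Prop := ∀ (tokenized_corpus : List (List String)) (window_size : Int), Dom_get_focus_context_pairs tokenized_corpus window_size → Spec_get_focus_context_pairs tokenized_corpus window_size (get_focus_context_pairs tokenized_corpus window_size)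

-- ===== LEMMAS AND PROOFS =====

-- window size as a natural number; the two context windows and the canonical per-sentence output
-- both programs are shown to produce
def pvWn (w : Int) : Nat := (max 0 w).toNat
def pvLWin (w : Int) (s : List String) (i : Nat) : List String := (s.take i).drop (i - pvWn w)
def pvRWin (w : Int) (s : List String) (i : Nat) : List String := (s.drop (i + 1)).take (pvWn w)
def pvRow (w : Int) (s : List String) (i : Nat) : List (List String) :=
  (pvLWin w s i ++ pvRWin w s i).map (fun c => [s.getD i "", c])
def pvCanon (w : Int) (s : List String) : List (List String) :=
  (List.range s.length).flatMap (pvRow w s)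
def pvCtx (s : List String) (t : String) (p : Int) : List (List String) :=
  if p < 0 then [] else ((PySem.List.pyGet? s p).map (fun c => [t, c])).toList

theorem pvFlatMap_congr_mem {α β : Type} {l : List α} {f g : α → List β}
    (h : ∀ x ∈ l, f x = g x) : l.flatMap f = l.flatMap g := by
  induction l with
  | nil => rfl
  | cons a l ih =>
    simp only [List.flatMap_cons]
    rw [h a (by simp), ih (fun x hx => h x (by simp [hx]))]

theorem pvCtx_range (s : List String) (t : String) :
    ∀ (n : Nat) (a b : Int), 0 ≤ a → 0 ≤ b → n = (b - a).toNat →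
      (PySem.List.pyRange a b 1).flatMap (pvCtx s t)
        = ((s.drop a.toNat).take (b.toNat - a.toNat)).map (fun c => [t, c]) := by
  intro n
  induction n with
  | zero =>
    intro a b ha hb hn
    have hba : b ≤ a := by omega
    rw [PySem.List.pyRange_one_eq_nil hba]
    have : b.toNat - a.toNat = 0 := by omega
    simp [this]
  | succ n ih =>
    intro a b ha hb hn
    have hab : a < b := by omega
    rw [PySem.List.pyRange_one_cons hab]
    simp only [List.flatMap_cons]
    rw [ih (a + 1) b (by omega) hb (by omega)]
    by_cases hlt : a < (s.length : Int)
    · have hget : PySem.List.pyGet? s a = some s[a.toNat] :=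
        PySem.List.pyGet?_eq_some_getElem s ha (by exact_mod_cast hlt)
      have hdrop : s.drop a.toNat = s[a.toNat] :: s.drop (a.toNat + 1) := by
        rw [List.drop_eq_getElem_cons (by omega)]
      have harith : b.toNat - a.toNat = (b.toNat - (a + 1).toNat) + 1 := by omega
      have harith2 : (a + 1).toNat = a.toNat + 1 := by omega
      rw [hdrop, harith, List.take_succ_cons]
      simp [pvCtx, hget, not_lt.mpr ha, harith2]
    · have hnone : PySem.List.pyGet? s a = none := by
        rw [PySem.List.pyGet?_eq_none_iff]
        simp [PySem.Raise.InRange]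
        omega
      have hdrop : s.length ≤ a.toNat := by omega
      have hdrop1 : s.length ≤ (a + 1).toNat := by omega
      simp [pvCtx, hnone, not_lt.mpr ha, List.drop_eq_nil_of_le hdrop,
        List.drop_eq_nil_of_le hdrop1]

theorem pvShift {β : Type} (g : Int → List β) (k u v : Int) :
    (PySem.List.pyRange u v 1).flatMap (fun w => g (k + w))
      = (PySem.List.pyRange (k + u) (k + v) 1).flatMap g := by
  rw [PySem.List.pyRange_one u v, PySem.List.pyRange_one (k + u) (k + v)]
  have : (v - u) = (k + v - (k + u)) := by ring
  rw [← this]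
  simp only [List.flatMap_map]
  apply pvFlatMap_congr_mem
  intro x _
  show g (k + (u + x)) = g (k + u + x)
  congr 1
  ring

theorem pvCtx_neg_range (s : List String) (t : String) (a : Int) :
    (PySem.List.pyRange a 0 1).flatMap (pvCtx s t) = [] := by
  rw [List.flatMap_eq_nil_iff]
  intro x hx
  have := (PySem.List.mem_pyRange_one).mp hx
  simp [pvCtx, this.2]

theorem pvToken (s : List String) (t : String) (W : Int) (i : Nat) :
    (PySem.List.pyRange (-W) (W + 1) 1).flatMap (fun w =>
        if w = 0 ∨ (s.length : Int) ≤ (i : Int) + w ∨ (i : Int) + w < 0 then []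
        else
          match PySem.List.pyGet? s ((i : Int) + w) with
          | some c => [[t, c]]
          | none => [])
      = (pvLWin W s i ++ pvRWin W s i).map (fun c => [t, c]) := by
  have hk : (0 : Int) ≤ (i : Int) := by omega
  have hg : ∀ w : Int,
      (if w = 0 ∨ (s.length : Int) ≤ (i : Int) + w ∨ (i : Int) + w < 0 then []
       else
         match PySem.List.pyGet? s ((i : Int) + w) with
         | some c => [[t, c]]
         | none => ([] : List (List String)))
        = if w = 0 then [] else pvCtx s t ((i : Int) + w) := by
    intro w
    by_cases hw : w = 0
    · simp [hw]
    · by_cases hneg : (i : Int) + w < 0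
      · simp [pvCtx, hw, hneg]
      · by_cases hbig : (s.length : Int) ≤ (i : Int) + w
        · have hnone : PySem.List.pyGet? s ((i : Int) + w) = none := by
            rw [PySem.List.pyGet?_eq_none_iff]
            simp [PySem.Raise.InRange]
            omega
          simp [pvCtx, hw, hneg, hbig, hnone]
        · have hget : PySem.List.pyGet? s ((i : Int) + w) = some s[((i : Int) + w).toNat] :=
            PySem.List.pyGet?_eq_some_getElem s (by omega) (by omega)
          simp [pvCtx, hw, hneg, hbig, hget]
  simp only [hg]
  rw [List.map_append]
  by_cases hW : 0 ≤ W
  · have hWn : (pvWn W : Int) = W := by simp [pvWn]; omega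
    rw [PySem.List.pyRange_one_append (-W) 0 (W + 1) (by omega) (by omega),
        PySem.List.pyRange_one_append 0 1 (W + 1) (by omega) (by omega)]
    have h01 : PySem.List.pyRange 0 1 1 = [0] := by
      simpa using PySem.List.pyRange_one_singleton (0 : Int)
    simp only [List.flatMap_append, h01, List.flatMap_cons, List.flatMap_nil]
    have hleft : (PySem.List.pyRange (-W) 0 1).flatMap (fun w => if w = 0 then [] else pvCtx s t ((i : Int) + w))
        = (pvLWin W s i).map (fun c => [t, c]) := by
      rw [pvFlatMap_congr_mem (g := fun w => pvCtx s t ((i : Int) + w))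
          (by intro x hx
              have := PySem.List.mem_pyRange_one.mp hx
              have hx0 : x ≠ 0 := by omega
              simp [hx0])]
      rw [pvShift (pvCtx s t) (i : Int) (-W) 0]
      have hk0 : (i : Int) + (0:Int) = (i : Int) := by ring
      have hkW : (i : Int) + -W = (i : Int) - W := by ring
      rw [hk0, hkW]
      have hsplit : PySem.List.pyRange ((i : Int) - W) (i : Int) 1
          = PySem.List.pyRange ((i : Int) - W) (max 0 ((i : Int) - W)) 1 ++ PySem.List.pyRange (max 0 ((i : Int) - W)) (i : Int) 1 :=
        PySem.List.pyRange_one_append _ _ _ (by omega) (by omega)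
      rw [hsplit, List.flatMap_append]
      have hfirst : (PySem.List.pyRange ((i : Int) - W) (max 0 ((i : Int) - W)) 1).flatMap (pvCtx s t) = [] := by
        by_cases h0 : 0 ≤ (i : Int) - W
        · have : max 0 ((i : Int) - W) = (i : Int) - W := by omega
          rw [this, PySem.List.pyRange_one_eq_nil le_rfl]
          simp
        · have : max 0 ((i : Int) - W) = 0 := by omega
          rw [this]
          exact pvCtx_neg_range s t _
      rw [hfirst, List.nil_append,
          pvCtx_range s t (((i : Int) - max 0 ((i : Int) - W)).toNat) (max 0 ((i : Int) - W)) (i : Int) (by omega) (by omega) rfl]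
      unfold pvLWin
      rw [List.drop_take]
      have h1 : (max 0 ((i:Int) - W)).toNat = i - pvWn W := by omega
      have h2 : ((i:Int)).toNat - (max 0 ((i:Int) - W)).toNat = i - (i - pvWn W) := by omega
      rw [h2, h1]
    have hright : (PySem.List.pyRange 1 (W + 1) 1).flatMap (fun w => if w = 0 then [] else pvCtx s t ((i : Int) + w))
        = (pvRWin W s i).map (fun c => [t, c]) := by
      rw [pvFlatMap_congr_mem (g := fun w => pvCtx s t ((i : Int) + w))
          (by intro x hx
              have := PySem.List.mem_pyRange_one.mp hx
              have hx0 : x ≠ 0 := by omega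
              simp [hx0])]
      rw [pvShift (pvCtx s t) (i : Int) 1 (W + 1)]
      have : (i : Int) + (W + 1) = (i : Int) + W + 1 := by ring
      rw [this,
          pvCtx_range s t (((i : Int) + W + 1 - ((i : Int) + 1)).toNat) ((i : Int) + 1) ((i : Int) + W + 1) (by omega) (by omega) rfl]
      unfold pvRWin
      have h1 : ((i:Int) + 1).toNat = i + 1 := by omega
      have h2 : ((i:Int) + W + 1).toNat - ((i:Int) + 1).toNat = pvWn W := by omega
      rw [h2, h1]
    rw [hleft, hright]
    simp
  · have hWn : pvWn W = 0 := by simp [pvWn]; omega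
    rw [PySem.List.pyRange_one_eq_nil (by omega)]
    unfold pvLWin pvRWin
    rw [hWn]
    simp

theorem pvSentenceA (W : Int) (s : List String) (acc : List (List String)) :
    (PySem.List.enumerate s 0).foldl (fun acc2 p =>
      (PySem.List.pyRange (-W) (W + 1) 1).foldl (fun acc3 w =>
        if w = 0 ∨ (s.length : Int) ≤ p.1 + w ∨ p.1 + w < 0 then acc3
        else
          match PySem.List.pyGet? s (p.1 + w) with
          | some c => acc3 ++ [[p.2, c]]
          | none => acc3) acc2) acc
    = acc ++ pvCanon W s := by
  have hstep : (fun (acc2 : List (List String)) (p : Int × String) =>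
      (PySem.List.pyRange (-W) (W + 1) 1).foldl (fun acc3 w =>
        if w = 0 ∨ (s.length : Int) ≤ p.1 + w ∨ p.1 + w < 0 then acc3
        else
          match PySem.List.pyGet? s (p.1 + w) with
          | some c => acc3 ++ [[p.2, c]]
          | none => acc3) acc2)
      = fun acc2 p => acc2 ++ (PySem.List.pyRange (-W) (W + 1) 1).flatMap (fun w =>
          if w = 0 ∨ (s.length : Int) ≤ p.1 + w ∨ p.1 + w < 0 then []
          else
            match PySem.List.pyGet? s (p.1 + w) with
            | some c => [[p.2, c]]
            | none => []) := by
    funext acc2 p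
    rw [← PySem.List.foldl_append_eq_flatMap]
    apply PySem.List.foldl_congr_mem
    intro b w _
    by_cases hg : w = 0 ∨ (s.length : Int) ≤ p.1 + w ∨ p.1 + w < 0
    · simp [hg]
    · cases PySem.List.pyGet? s (p.1 + w) <;> simp [hg]
  rw [hstep, PySem.List.foldl_append_eq_flatMap]
  congr 1
  rw [PySem.List.enumerate_eq_map_pyRange s "", PySem.List.len_eq,
      PySem.List.pyRange_zero_natCast s.length, List.map_map, List.flatMap_map]
  unfold pvCanon
  apply pvFlatMap_congr_mem
  intro i _
  show (PySem.List.pyRange (-W) (W + 1) 1).flatMap (fun w =>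
      if w = 0 ∨ (s.length : Int) ≤ (i : Int) + w ∨ (i : Int) + w < 0 then []
      else
        match PySem.List.pyGet? s ((i : Int) + w) with
        | some c => [[PySem.List.pyGetD s (i : Int) "", c]]
        | none => []) = pvRow W s i
  rw [pvToken s (PySem.List.pyGetD s (i : Int) "") W i]
  unfold pvRow
  simp


-- ---------- B side: the two buffer passes in recursion form ----------
def pvGF (w : Int) : List String → List String → List (List (List String))
  | [], _ => []
  | tok :: t, b =>
      b.map (fun c => [tok, c]) ::
        pvGF w t
          (let b' := b ++ [tok]
           if w < (PySem.List.len b') then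
             match PySem.List.pop? b' 0 with
             | some r => r.2
             | none => b'
           else b')

def pvGR (w : Int) : List String → List String → List (List (List String))
  | [], _ => []
  | tok :: t, b =>
      b.map (fun c => [tok, c]) ::
        pvGR w t (PySem.List.slice (PySem.List.insert b 0 tok) none (some w))

-- pop(0) on a nonempty list is the tail
theorem pvPop0 (l : List String) (h : l ≠ []) :
    (match PySem.List.pop? l 0 with
     | some r => r.2
     | none => l) = l.tail := by
  cases l with
  | nil => simp at h
  | cons x xs => simp [PySem.List.pop?_zero_cons]

theorem pvTrimF (w : Int) (pre : List String) (tok : String) :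
    (let b' := pre.drop (pre.length - pvWn w) ++ [tok]
     if w < (PySem.List.len b') then
       match PySem.List.pop? b' 0 with
       | some r => r.2
       | none => b'
     else b')
    = (pre ++ [tok]).drop (pre.length + 1 - pvWn w) := by
  have hb' : pre.drop (pre.length - pvWn w) ++ [tok] = (pre ++ [tok]).drop (pre.length - pvWn w) := by
    rw [List.drop_append_of_le_length (by omega)]
  have hlen : (pre.drop (pre.length - pvWn w) ++ [tok]).length = min pre.length (pvWn w) + 1 := by
    simp; omega
  simp only [PySem.List.len_eq]
  by_cases hc : w < ((pre.drop (pre.length - pvWn w) ++ [tok]).length : Int)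
  · simp only [hc, if_pos]
    rw [pvPop0 _ (by simp), hb', List.tail_drop]
    congr 1
    have hwn : pvWn w = (max 0 w).toNat := rfl
    omega
  · simp only [hc, if_neg, not_false_iff]
    rw [hb']
    congr 1
    have hwn : pvWn w = (max 0 w).toNat := rfl
    omega

theorem pvGF_spec (w : Int) :
    ∀ (s pre : List String),
      pvGF w s (pre.drop (pre.length - pvWn w))
        = (List.range s.length).map (fun i =>
            (((pre ++ s).take (pre.length + i)).drop (pre.length + i - pvWn w)).map
              (fun c => [s.getD i "", c])) := by
  intro s
  induction s with
  | nil => intro pre; simp [pvGF]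
  | cons tok t ih =>
    intro pre
    show (pre.drop (pre.length - pvWn w)).map (fun c => [tok, c]) :: pvGF w t _ = _
    rw [pvTrimF w pre tok]
    have hpre' : (pre ++ [tok]).drop (pre.length + 1 - pvWn w)
        = (pre ++ [tok]).drop ((pre ++ [tok]).length - pvWn w) := by
      simp
    rw [hpre', ih (pre ++ [tok])]
    simp only [List.length_cons]
    rw [List.range_succ_eq_map, List.map_cons, List.map_map]
    congr 1
    · have h0 : (pre ++ tok :: t).take (pre.length + 0) = pre := by
        simp
      rw [h0]
      simp
    · apply List.map_congr_left
      intro i _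
      have hfull : (pre ++ [tok]) ++ t = pre ++ tok :: t := by simp
      have hlen : (pre ++ [tok]).length = pre.length + 1 := by simp
      simp only [Function.comp_apply, hfull, hlen]
      have h1 : pre.length + 1 + i = pre.length + (i + 1) := by omega
      have h2 : (tok :: t).getD (i + 1) "" = t.getD i "" := by simp [List.getD]
      rw [h1, h2]

theorem pvTrimR (w : Int) (l : List String) (tok : String) (h : l.length ≤ pvWn w) :
    PySem.List.slice (PySem.List.insert l 0 tok) none (some w) = (tok :: l).take (pvWn w) := by
  rw [PySem.List.insert_zero]
  by_cases hw : 0 ≤ w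
  · rw [PySem.List.slice_to _ hw]
    congr 1
    simp [pvWn]; omega
  · have hWn : pvWn w = 0 := by simp [pvWn]; omega
    have hl : l = [] := by
      rw [hWn] at h
      exact List.eq_nil_of_length_eq_zero (by omega)
    subst hl
    have h1 : PySem.List.slice [tok] none (some w) = [] := by
      have hk : w = -(((-w).toNat : Nat) : Int) := by omega
      rw [hk, PySem.List.slice_to_neg_natCast _ _ (by omega)]
      have h0 : [tok].length - (-w).toNat = 0 := by simp; omega
      rw [h0, List.take_zero]
    rw [h1, hWn, List.take_zero]

theorem pvGR_spec (w : Int) :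
    ∀ (s suf : List String),
      pvGR w s.reverse (suf.take (pvWn w))
        = ((List.range s.length).map (fun i =>
            (((s ++ suf).drop (i + 1)).take (pvWn w)).map (fun c => [s.getD i "", c]))).reverse := by
  intro s
  induction s using List.reverseRecOn with
  | nil => intro suf; simp [pvGR]
  | append_singleton s' a ih =>
    intro suf
    rw [List.reverse_append]
    show (suf.take (pvWn w)).map (fun c => [a, c]) :: pvGR w s'.reverse _ = _
    have htrim : PySem.List.slice (PySem.List.insert (suf.take (pvWn w)) 0 a) none (some w)
        = (a :: suf).take (pvWn w) := by
      rw [pvTrimR w _ a (by simp)]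
      cases hWn : pvWn w with
      | zero => simp
      | succ m =>
        simp [List.take_succ_cons, List.take_take]
    rw [htrim, ih (a :: suf)]
    have hfull : s' ++ a :: suf = (s' ++ [a]) ++ suf := by simp
    rw [List.length_append, List.length_cons, List.length_nil, Nat.zero_add,
        List.range_succ, List.map_append, List.reverse_append]
    simp only [List.map_cons, List.map_nil, List.reverse_cons, List.reverse_nil,
      List.nil_append, List.cons_append]
    congr 1
    · -- head row: token a at index s'.length
      have hget : (s' ++ [a]).getD s'.length "" = a := by
        simp [List.getD]
      have hdrop : ((s' ++ [a] ++ suf).drop (s'.length + 1)).take (pvWn w) = suf.take (pvWn w) := by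
        have : s' ++ [a] ++ suf = (s' ++ [a]) ++ suf := rfl
        rw [this, List.drop_append_of_le_length (by simp)]
        simp
      rw [hget, hdrop]
    · -- earlier rows agree
      congr 1
      apply List.map_congr_left
      intro i hi
      have hilt : i < s'.length := List.mem_range.mp hi
      rw [hfull]
      congr 2
      rw [List.getD_append _ _ _ _ hilt]

theorem pvFoldF (w : Int) :
    ∀ (s : List String) (L : List (List (List String))) (b : List String),
      (s.foldl (fun (st : List (List (List String)) × List String) tok =>
        let lefts := st.1 ++ [st.2.map (fun c => [tok, c])]
        let buf := st.2 ++ [tok]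
        let buf := if w < (PySem.List.len buf) then
            match PySem.List.pop? buf 0 with
            | some r => r.2
            | none => buf
          else buf
        (lefts, buf)) (L, b)).1 = L ++ pvGF w s b := by
  intro s
  induction s with
  | nil => intro L b; simp [pvGF]
  | cons tok t ih =>
    intro L b
    simp only [List.foldl_cons]
    rw [ih]
    simp [pvGF]

theorem pvFoldR (w : Int) :
    ∀ (s : List String) (L : List (List (List String))) (b : List String),
      (s.foldl (fun (st : List (List (List String)) × List String) tok =>
        let rights := st.1 ++ [st.2.map (fun c => [tok, c])]
        let buf := PySem.List.slice (PySem.List.insert st.2 0 tok) none (some w)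
        (rights, buf)) (L, b)).1 = L ++ pvGR w s b := by
  intro s
  induction s with
  | nil => intro L b; simp [pvGR]
  | cons tok t ih =>
    intro L b
    simp only [List.foldl_cons]
    rw [ih]
    simp [pvGR]

theorem pvSentenceB (w : Int) (s : List String) (pairs : List (List String)) :
    (let fwd := s.foldl (fun (st : List (List (List String)) × List String) tok =>
      let lefts := st.1 ++ [st.2.map (fun c => [tok, c])]
      let buf := st.2 ++ [tok]
      let buf := if w < (PySem.List.len buf) then
          match PySem.List.pop? buf 0 with
          | some r => r.2
          | none => buf
        else buf
      (lefts, buf)) ([], [])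
    let bwd := s.reverse.foldl (fun (st : List (List (List String)) × List String) tok =>
      let rights := st.1 ++ [st.2.map (fun c => [tok, c])]
      let buf := PySem.List.slice (PySem.List.insert st.2 0 tok) none (some w)
      (rights, buf)) ([], [])
    (fwd.1.zip bwd.1.reverse).foldl (fun acc lr => acc ++ lr.1 ++ lr.2) pairs)
    = pairs ++ pvCanon w s := by
  have hlefts : (s.foldl (fun (st : List (List (List String)) × List String) tok =>
      let lefts := st.1 ++ [st.2.map (fun c => [tok, c])]
      let buf := st.2 ++ [tok]
      let buf := if w < (PySem.List.len buf) then
          match PySem.List.pop? buf 0 with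
          | some r => r.2
          | none => buf
        else buf
      (lefts, buf)) ([], [])).1
      = (List.range s.length).map (fun i => (pvLWin w s i).map (fun c => [s.getD i "", c])) := by
    rw [pvFoldF w s [] []]
    have h0 : ([] : List String) = ([] : List String).drop (([] : List String).length - pvWn w) := by
      simp
    rw [List.nil_append, h0, pvGF_spec w s []]
    apply List.map_congr_left
    intro i _
    simp [pvLWin]
  have hrights : ((s.reverse.foldl (fun (st : List (List (List String)) × List String) tok =>
      let rights := st.1 ++ [st.2.map (fun c => [tok, c])]
      let buf := PySem.List.slice (PySem.List.insert st.2 0 tok) none (some w)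
      (rights, buf)) ([], [])).1).reverse
      = (List.range s.length).map (fun i => (pvRWin w s i).map (fun c => [s.getD i "", c])) := by
    rw [pvFoldR w s.reverse [] []]
    have h0 : ([] : List String) = ([] : List String).take (pvWn w) := by simp
    rw [List.nil_append, h0, pvGR_spec w s []]
    rw [List.reverse_reverse]
    apply List.map_congr_left
    intro i _
    simp [pvRWin]
  show ((s.foldl _ ([], [])).1.zip ((s.reverse.foldl _ ([], [])).1).reverse).foldl
      (fun acc lr => acc ++ lr.1 ++ lr.2) pairs = pairs ++ pvCanon w s
  rw [hlefts, hrights, List.zip_map']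
  have hstep : (fun (acc : List (List String)) (lr : List (List String) × List (List String)) =>
      acc ++ lr.1 ++ lr.2) = fun acc lr => acc ++ (lr.1 ++ lr.2) := by
    funext acc lr
    simp
  rw [hstep, PySem.List.foldl_append_eq_flatMap, List.flatMap_map]
  congr 1
  unfold pvCanon
  apply pvFlatMap_congr_mem
  intro i _
  simp [pvRow]

-- ===== VERDICT (by name: the statement is the Claim_ definition above) =====
theorem get_focus_context_pairs_spec : Claim_equal_get_focus_context_pairs := by
  intro tc w _
  unfold Spec_get_focus_context_pairs get_focus_context_pairs get_focus_context_pairs_alt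
  have h : (fun (acc : List (List String)) (sentence : List String) =>
      (PySem.List.enumerate sentence 0).foldl (fun acc2 p =>
        (PySem.List.pyRange (-w) (w + 1) 1).foldl (fun acc3 v =>
          if v = 0 ∨ (sentence.length : Int) ≤ p.1 + v ∨ p.1 + v < 0 then acc3
          else
            match PySem.List.pyGet? sentence (p.1 + v) with
            | some c => acc3 ++ [[p.2, c]]
            | none => acc3) acc2) acc)
      = fun (pairs : List (List String)) (sentence : List String) =>
      (let fwd := sentence.foldl (fun (st : List (List (List String)) × List String) tok =>
        let lefts := st.1 ++ [st.2.map (fun c => [tok, c])]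
        let buf := st.2 ++ [tok]
        let buf := if w < (PySem.List.len buf) then
            match PySem.List.pop? buf 0 with
            | some r => r.2
            | none => buf
          else buf
        (lefts, buf)) ([], [])
      let bwd := sentence.reverse.foldl (fun (st : List (List (List String)) × List String) tok =>
        let rights := st.1 ++ [st.2.map (fun c => [tok, c])]
        let buf := PySem.List.slice (PySem.List.insert st.2 0 tok) none (some w)
        (rights, buf)) ([], [])
      (fwd.1.zip bwd.1.reverse).foldl (fun acc lr => acc ++ lr.1 ++ lr.2) pairs) := by
    funext acc s
    exact (pvSentenceA w s acc).trans (pvSentenceB w s acc).symm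
  rw [h]
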